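-- pv_equiv track=rewrite | github.com/jakeakrajewski/AoC | Python/Day3/Part2.py | identify_numbers_and_starting_indices
-- ===== SOURCE A (Python) =====
-- def identify_numbers_and_starting_indices(line):
--     numbers_info = []
--     i = 0
--     while i < len(line):
--         if line[i].isdigit():
--             start_index = i
--             while i < len(line) and line[i].isdigit():
--                 i += 1
--             numbers_info.append((int(line[start_index:i]), start_index))
--         else:
--             i += 1
--     return numbers_info
-- ===== SOURCE B (Python) =====
-- def identify_numbers_and_starting_indices(line):
--     numbers_info = []
--     start = None
--     for i, ch in enumerate(line):
--         if ch.isdigit():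
--             if start is None:
--                 start = i
--         elif start is not None:
--             numbers_info.append((int(line[start:i]), start))
--             start = None
--     if start is not None:
--         numbers_info.append((int(line[start:]), start))
--     return numbers_info
-- ===== Notes on version B (the rewrite author's own statement) =====
-- stated objective: simpler
-- what changed: Replaced the nested while-loops with explicit index arithmetic by a single for-loop state machine over enumerate(line) that tracks the current run's start (None when outside a run) and flushes once at the end; a timing run also measured it faster by a constant factor (one iterator pass instead of repeated indexed __getitem__/bounds checks).
import Mathlib
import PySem

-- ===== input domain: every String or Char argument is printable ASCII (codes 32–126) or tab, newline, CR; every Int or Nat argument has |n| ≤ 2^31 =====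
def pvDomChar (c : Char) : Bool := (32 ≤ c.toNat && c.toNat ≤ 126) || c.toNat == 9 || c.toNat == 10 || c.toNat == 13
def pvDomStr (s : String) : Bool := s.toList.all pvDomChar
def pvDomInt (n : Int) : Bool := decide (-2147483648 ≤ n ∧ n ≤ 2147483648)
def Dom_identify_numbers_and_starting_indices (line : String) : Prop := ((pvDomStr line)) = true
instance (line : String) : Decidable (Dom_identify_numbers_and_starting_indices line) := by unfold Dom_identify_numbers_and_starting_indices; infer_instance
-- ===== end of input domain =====

-- B replaces A's nested while-loops and index arithmetic by a single-pass state machine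
-- over enumerate(line) (objective: simpler); same O(n) cost, identical return value.

-- ===== PORT A =====
-- inner `while i < len(line) and line[i].isdigit(): i += 1` (returns the new i)
def pvASkip (cs : List Char) (i : Nat) : Nat :=
  if h : i < cs.length then
    if PySem.Chars.isdigit cs[i] then pvASkip cs (i + 1) else i
  else i
termination_by cs.length - i

-- the skip loop never moves left (used for the outer loop's termination)
theorem pvASkip_le (cs : List Char) (i : Nat) : i ≤ pvASkip cs i := by
  unfold pvASkip
  split
  · split
    · exact Nat.le_trans (Nat.le_succ i) (pvASkip_le cs (i + 1))
    · exact Nat.le_refl i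
  · exact Nat.le_refl i
termination_by cs.length - i

-- outer `while i < len(line)` loop; int(line[start_index:i]) never raises here
-- (the slice is a nonempty digit run), so `.getD 0` is only a type-level default
def pvALoop (cs : List Char) (i : Nat) (acc : List (Int × Int)) : List (Int × Int) :=
  if h : i < cs.length then
    if PySem.Chars.isdigit cs[i] then
      pvALoop cs (pvASkip cs (i + 1))
        (acc ++ [((PySem.Int.ofChars?
            (PySem.List.slice cs (some (i : Int)) (some ((pvASkip cs (i + 1) : Nat) : Int)))).getD 0,
          (i : Int))])
    else pvALoop cs (i + 1) acc
  else acc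
termination_by cs.length - i
decreasing_by
  · have := pvASkip_le cs (i + 1); omega
  · omega

def identify_numbers_and_starting_indices (line : String) : List (Int × Int) :=
  pvALoop line.toList 0 []

-- ===== PORT B =====
-- one step of B's for-loop: state = (numbers_info, start); p = (i, ch) from enumerate
def pvBStep (cs : List Char) (st : List (Int × Int) × Option Int) (p : Int × Char) :
    List (Int × Int) × Option Int :=
  if PySem.Chars.isdigit p.2 then
    match st.2 with
    | none => (st.1, some p.1)
    | some _ => st
  else
    match st.2 with
    | some s =>
        (st.1 ++ [((PySem.Int.ofChars? (PySem.List.slice cs (some s) (some p.1))).getD 0, s)], none)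
    | none => st

-- the final `if start is not None: append(int(line[start:]), start)`
def pvBFlush (cs : List Char) (st : List (Int × Int) × Option Int) : List (Int × Int) :=
  match st.2 with
  | some s => st.1 ++ [((PySem.Int.ofChars? (PySem.List.slice cs (some s) none)).getD 0, s)]
  | none => st.1

def identify_numbers_and_starting_indices_alt (line : String) : List (Int × Int) :=
  let cs := line.toList
  pvBFlush cs ((PySem.List.enumerate cs 0).foldl (pvBStep cs) ([], none))

-- ===== PRECONDITION & SPEC =====
def Spec_identify_numbers_and_starting_indices (line : String) (out : List (Int × Int)) : Prop := out = identify_numbers_and_starting_indices_alt line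
instance (line : String) (out : List (Int × Int)) : Decidable (Spec_identify_numbers_and_starting_indices line out) := by unfold Spec_identify_numbers_and_starting_indices; infer_instance

-- ===== CLAIM (what is proved, stated in full; the proofs are below) =====
def Claim_equal_identify_numbers_and_starting_indices : Prop := ∀ (line : String), Dom_identify_numbers_and_starting_indices line → Spec_identify_numbers_and_starting_indices line (identify_numbers_and_starting_indices line)

-- ===== LEMMAS AND PROOFS =====

-- the suffix of enumerate(cs) from position i, exposed one pair at a time
theorem pv_enum_drop_cons (cs : List Char) (i : Nat) (h : i < cs.length) :
    (PySem.List.enumerate cs 0).drop i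
      = ((i : Int), cs[i]) :: (PySem.List.enumerate cs 0).drop (i + 1) := by
  have hlen : i < (PySem.List.enumerate cs 0).length := by
    simpa [PySem.List.length_enumerate] using h
  have := List.drop_eq_getElem_cons hlen
  simpa [PySem.List.getElem_enumerate] using this

theorem pv_enum_drop_nil (cs : List Char) (i : Nat) (h : ¬ i < cs.length) :
    (PySem.List.enumerate cs 0).drop i = [] := by
  apply List.drop_eq_nil_of_le
  simpa [PySem.List.length_enumerate] using Nat.le_of_not_lt h

-- the end-of-line slice equals the closed slice at any bound past the end
theorem pv_slice_end (cs : List Char) (s i : Nat) (hs : s ≤ i) (hi : cs.length ≤ i) :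
    PySem.List.slice cs (some (s : Int)) (some (i : Int))
      = PySem.List.slice cs (some (s : Int)) none := by
  rw [PySem.List.slice_natCast, PySem.List.slice_from_natCast]
  apply List.take_of_length_le
  simp [List.length_drop]
  omega

-- joint loop invariant: from position i, B's fold-then-flush agrees with A's outer loop,
-- both outside a digit run (start = none) and inside one started at s (start = some s)
theorem pv_main (cs : List Char) (k : Nat) : ∀ i acc, cs.length - i ≤ k →
    (pvBFlush cs (((PySem.List.enumerate cs 0).drop i).foldl (pvBStep cs) (acc, none))
        = pvALoop cs i acc)
    ∧ (∀ s : Nat, s ≤ i →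
        pvBFlush cs (((PySem.List.enumerate cs 0).drop i).foldl (pvBStep cs) (acc, some (s : Int)))
          = pvALoop cs (pvASkip cs i)
              (acc ++ [((PySem.Int.ofChars?
                  (PySem.List.slice cs (some (s : Int)) (some ((pvASkip cs i : Nat) : Int)))).getD 0,
                (s : Int))])) := by
  induction k with
  | zero =>
      intro i acc hk
      have hi : ¬ i < cs.length := by omega
      constructor
      · rw [pv_enum_drop_nil cs i hi]
        rw [pvALoop]
        simp [hi, pvBFlush]
      · intro s hs
        rw [pv_enum_drop_nil cs i hi]
        rw [pvASkip]
        rw [pvALoop]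
        simp only [hi, dite_false]
        simp [pvBFlush, pv_slice_end cs s i hs (Nat.le_of_not_lt hi)]
  | succ k ih =>
      intro i acc hk
      by_cases hi : i < cs.length
      · have hk' : cs.length - (i + 1) ≤ k := by omega
        by_cases hd : PySem.Chars.isdigit cs[i]
        · constructor
          · rw [pv_enum_drop_cons cs i hi]
            simp only [List.foldl_cons]
            have hstep : pvBStep cs (acc, none) ((i : Int), cs[i]) = (acc, some (i : Int)) := by
              simp [pvBStep, hd]
            rw [hstep]
            rw [(ih (i + 1) acc hk').2 i (Nat.le_succ i)]
            conv_rhs => rw [pvALoop]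
            simp [hi, hd]
          · intro s hs
            rw [pv_enum_drop_cons cs i hi]
            simp only [List.foldl_cons]
            have hstep : pvBStep cs (acc, some (s : Int)) ((i : Int), cs[i])
                = (acc, some (s : Int)) := by
              simp [pvBStep, hd]
            rw [hstep]
            rw [(ih (i + 1) acc hk').2 s (Nat.le_succ_of_le hs)]
            have hskip : pvASkip cs i = pvASkip cs (i + 1) := by
              conv_lhs => rw [pvASkip]
              simp [hi, hd]
            rw [hskip]
        · constructor
          · rw [pv_enum_drop_cons cs i hi]
            simp only [List.foldl_cons]
            have hstep : pvBStep cs (acc, none) ((i : Int), cs[i]) = (acc, none) := by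
              simp [pvBStep, hd]
            rw [hstep]
            rw [(ih (i + 1) acc hk').1]
            conv_rhs => rw [pvALoop]
            simp [hi, hd]
          · intro s hs
            rw [pv_enum_drop_cons cs i hi]
            simp only [List.foldl_cons]
            have hstep : pvBStep cs (acc, some (s : Int)) ((i : Int), cs[i])
                = (acc ++ [((PySem.Int.ofChars?
                    (PySem.List.slice cs (some (s : Int)) (some (i : Int)))).getD 0, (s : Int))],
                  none) := by
              simp [pvBStep, hd]
            rw [hstep]
            rw [(ih (i + 1) _ hk').1]
            have hskip : pvASkip cs i = i := by
              rw [pvASkip]; simp [hi, hd]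
            conv_rhs => rw [hskip, pvALoop]
            simp [hi, hd]
      · -- i past the end: same as the base case
        constructor
        · rw [pv_enum_drop_nil cs i hi]
          rw [pvALoop]
          simp [hi, pvBFlush]
        · intro s hs
          rw [pv_enum_drop_nil cs i hi]
          rw [pvASkip]
          rw [pvALoop]
          simp only [hi, dite_false]
          simp [pvBFlush, pv_slice_end cs s i hs (Nat.le_of_not_lt hi)]

-- ===== VERDICT (by name: the statement is the Claim_ definition above) =====
theorem identify_numbers_and_starting_indices_spec : Claim_equal_identify_numbers_and_starting_indices := by
  intro line _
  unfold Spec_identify_numbers_and_starting_indices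
  unfold identify_numbers_and_starting_indices identify_numbers_and_starting_indices_alt
  have h := (pv_main line.toList line.toList.length 0 [] (by omega)).1
  simpa using h.symm
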